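-- pv_equiv track=rewrite | github.com/10kseok/AlgorithmProblemSolution | 프로그래머스/3/12938. 최고의 집합/최고의 집합.py | solution
-- ===== SOURCE A (Python) =====
-- def solution(n, s):
--     if n > s:
--         return [-1]
--     # 3, 9
--     # {3, 3, 3} = 27, {4, 4, 1} = 16, {3, 4, 2} = 24
--     # {..., Sn-2 // n - 2, Sn-1 // n - 1, S // n}
--     # 2, 9
--     # 9 - 0 // n = 3, 9 - 3 // n = 3, 6 - 3 // n = 3
--     # 3, 3, 3
--     answer = [0] * (n + 1)
--     buffer = [s] * (n + 1)
--     for i in range(n - 1, -1, -1):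
--         answer[i] = buffer[i + 1] // n
--         buffer[i] = buffer[i + 1] - answer[i]
--         n -= 1
--     return sorted(answer[:-1])
-- ===== SOURCE B (Python) =====
-- def solution(n, s):
--     if n > s:
--         return [-1]
--     if n <= 0:
--         return []
--     q, r = divmod(s, n)
--     return [q] * (n - r) + [q + 1] * r
-- ===== Notes on version B (the rewrite author's own statement) =====
-- stated objective: faster
-- what changed: Replaces A's backward greedy loop (repeatedly writing remaining//n into an array, then sorting) with the closed-form divmod distribution [q]*(n-r)+[q+1]*r, which is already sorted.
import Mathlib
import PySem

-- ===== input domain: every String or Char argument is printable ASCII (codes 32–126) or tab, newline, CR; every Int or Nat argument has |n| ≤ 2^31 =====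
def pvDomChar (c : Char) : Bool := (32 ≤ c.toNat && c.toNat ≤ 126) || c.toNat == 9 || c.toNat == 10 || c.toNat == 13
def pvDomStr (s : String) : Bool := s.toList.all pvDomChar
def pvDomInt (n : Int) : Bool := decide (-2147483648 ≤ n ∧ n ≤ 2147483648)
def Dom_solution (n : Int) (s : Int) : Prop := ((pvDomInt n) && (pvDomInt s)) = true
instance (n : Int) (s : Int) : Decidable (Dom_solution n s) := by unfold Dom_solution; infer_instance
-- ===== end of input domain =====

-- B replaces A's backward greedy loop (answer[i] = remaining // n, then re-sort) by the
-- closed-form divmod distribution [q]*(n-r) ++ [q+1]*r, which is already sorted: O(n) vs A's loop + sort.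

-- ===== PORT A =====
-- loop body: answer[i] = buffer[i+1] // n; buffer[i] = buffer[i+1] - answer[i]; n -= 1
-- (indices are always in range when the loop runs, so the total pyGetD/pySetD forms are exact here)
def solStep (st : List Int × List Int × Int) (i : Int) : List Int × List Int × Int :=
  let a := PySem.Int.floordiv (PySem.List.pyGetD st.2.1 (i+1) 0) st.2.2
  (PySem.List.pySetD st.1 i a,
   PySem.List.pySetD st.2.1 i (PySem.List.pyGetD st.2.1 (i+1) 0 - a),
   st.2.2 - 1)

def solution (n : Int) (s : Int) : List Int :=
  if n > s then [-1]
  else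
    let answer := PySem.List.pyRepeat [(0:Int)] (n+1)
    let buffer := PySem.List.pyRepeat [s] (n+1)
    let st := (PySem.List.pyRange (n-1) (-1) (-1)).foldl solStep (answer, buffer, n)
    PySem.List.sorted (PySem.List.slice st.1 none (some (-1))) (fun x => x) false

-- ===== PORT B =====
def solution_alt (n : Int) (s : Int) : List Int :=
  if n > s then [-1]
  else if n ≤ 0 then []
  else
    let q := PySem.Int.floordiv s n
    let r := PySem.Int.mod s n
    PySem.List.pyRepeat [q] (n - r) ++ PySem.List.pyRepeat [q+1] r

-- ===== PRECONDITION & SPEC =====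
def Spec_solution (n : Int) (s : Int) (out : List Int) : Prop := out = solution_alt n s
instance (n : Int) (s : Int) (out : List Int) : Decidable (Spec_solution n s out) := by unfold Spec_solution; infer_instance

-- ===== CLAIM (what is proved, stated in full; the proofs are below) =====
def Claim_equal_solution : Prop := ∀ (n : Int) (s : Int), Dom_solution n s → Spec_solution n s (solution n s)

-- ===== LEMMAS AND PROOFS =====

-- the value A's loop ends up writing at index j (proved below): ⌊(b + K - 1 - j) / K⌋
def solF (b : Int) (K : Nat) (j : Nat) : Int := PySem.Int.floordiv (b + (K:Int) - 1 - (j:Int)) (K:Int)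

theorem ediv_small (x k : Int) (hk : 0 < k) (h0 : 0 ≤ x) (h1 : x < 2*k) :
    x / k = if x < k then 0 else 1 := by
  split_ifs with h
  · exact Int.ediv_eq_zero_of_lt h0 h
  · rw [show x = (x - k) + 1 * k by ring, Int.add_mul_ediv_right _ _ (by omega)]
    rw [Int.ediv_eq_zero_of_lt (by omega) (by omega)]
    norm_num

-- the division identity behind the loop: subtracting ⌊b/(K+1)⌋ and splitting the rest over K parts
theorem solF_step (K : Nat) (b : Int) (j : Nat) (hj : j < K) :
    solF (b - PySem.Int.floordiv b ((K:Int)+1)) K j = solF b (K+1) j := by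
  have hjK : (j:Int) < (K:Int) := by exact_mod_cast hj
  have hj0 : (0:Int) ≤ (j:Int) := Int.natCast_nonneg j
  have hKpos : (0:Int) < (K:Int) + 1 := by omega
  set q := PySem.Int.floordiv b ((K:Int)+1) with hq
  have hsum : q * ((K:Int)+1) + PySem.Int.mod b ((K:Int)+1) = b := PySem.Int.floordiv_mul_add_mod b _
  set r := PySem.Int.mod b ((K:Int)+1) with hr
  have hr0 : 0 ≤ r := PySem.Int.mod_nonneg _ hKpos
  have hrK : r < (K:Int) + 1 := PySem.Int.mod_lt _ hKpos
  have hmul : q * ((K:Int)+1) = q * (K:Int) + q := by ring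
  unfold solF
  rw [PySem.Int.floordiv_eq_ediv_of_pos (by omega), PySem.Int.floordiv_eq_ediv_of_pos (by omega)]
  push_cast
  have hL : b - q + (K:Int) - 1 - (j:Int) = (r + (K:Int) - 1 - (j:Int)) + q * (K:Int) := by omega
  have hR : b + ((K:Int) + 1) - 1 - (j:Int) = (r + (K:Int) - (j:Int)) + q * ((K:Int)+1) := by omega
  rw [hL, hR, Int.add_mul_ediv_right _ _ (by omega), Int.add_mul_ediv_right _ _ (by omega)]
  rw [ediv_small _ _ (by omega) (by omega) (by omega), ediv_small _ _ (by omega) (by omega) (by omega)]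
  split_ifs with h1 h2 h2 <;> omega

-- what A's loop computes: every cell j < K of answer becomes solF b K j; cells ≥ K are untouched
theorem loopA (K : Nat) : ∀ (b : Int) (ans buf : List Int),
    K < ans.length → K < buf.length → PySem.List.pyGetD buf (K:Int) 0 = b →
    ((PySem.List.pyRange ((K:Int)-1) (-1) (-1)).foldl solStep (ans, buf, (K:Int))).1
      = (List.range K).map (solF b K) ++ ans.drop K := by
  induction K with
  | zero =>
    intro b ans buf _ _ _
    rw [PySem.List.pyRange_neg_one_eq_nil (by omega)]
    simp
  | succ K ih =>
    intro b ans buf hans hbuf hget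
    have hg : PySem.List.pyGetD buf ((K:Int)+1) 0 = b := by
      rw [show ((K:Int)+1) = ((K+1:Nat):Int) by push_cast; ring]; exact hget
    set a := PySem.Int.floordiv b ((K:Int)+1) with ha
    rw [show (((K:Nat)+1:Nat):Int) - 1 = ((K:Int)+1) - 1 by push_cast; ring,
        show ((K:Int)+1) - 1 = (K:Int) by ring,
        PySem.List.pyRange_neg_one_cons (by omega), List.foldl_cons]
    have hstep : solStep (ans, buf, (((K:Nat)+1 : Nat):Int)) (K:Int)
        = (ans.set K a, buf.set K (b - a), (K:Int)) := by
      simp only [solStep]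
      rw [hg]
      simp only [PySem.List.pySetD_natCast, Prod.mk.injEq]
      refine ⟨rfl, rfl, by push_cast; ring⟩
    rw [hstep]
    have hKb : K < buf.length := by omega
    have hget' : PySem.List.pyGetD (buf.set K (b - a)) (K:Int) 0 = b - a := by
      simp [List.getD_eq_getElem?_getD, List.getElem?_set_self hKb]
    rw [ih (b - a) (ans.set K a) (buf.set K (b - a)) (by simpa using Nat.lt_of_succ_lt hans)
        (by simpa using Nat.lt_of_succ_lt hbuf) hget']
    have hdrop : (ans.set K a).drop K = a :: ans.drop (K+1) := by
      rw [List.drop_eq_getElem_cons (by simpa using Nat.lt_of_succ_lt hans)]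
      rw [List.getElem_set_self, List.drop_set_of_lt (by omega)]
    have hmap : (List.range K).map (solF (b - a) K) = (List.range K).map (solF b (K+1)) :=
      List.map_congr_left fun j hj => solF_step K b j (List.mem_range.mp hj)
    have hlast : solF b (K+1) K = a := by
      unfold solF
      rw [show b + (((K:Nat)+1:Nat):Int) - 1 - (K:Int) = b by push_cast; ring,
          show (((K:Nat)+1:Nat):Int) = (K:Int)+1 by push_cast; ring]
    rw [hdrop, hmap, List.range_succ, List.map_append]
    simp [hlast]

-- the loop's output values, sorted, are exactly the divmod distribution (B's list)
theorem sorted_distrib (N : Nat) (hN : 1 ≤ N) (s : Int) :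
    PySem.List.sorted ((List.range N).map (solF s N)) (fun x => x) false
      = PySem.List.pyRepeat [PySem.Int.floordiv s (N:Int)] ((N:Int) - PySem.Int.mod s (N:Int))
        ++ PySem.List.pyRepeat [PySem.Int.floordiv s (N:Int) + 1] (PySem.Int.mod s (N:Int)) := by
  have hNpos : (0:Int) < (N:Int) := by exact_mod_cast hN
  set q := PySem.Int.floordiv s (N:Int) with hq
  have hsum : q * (N:Int) + PySem.Int.mod s (N:Int) = s := PySem.Int.floordiv_mul_add_mod s _
  set r := PySem.Int.mod s (N:Int) with hr
  have hr0 : 0 ≤ r := PySem.Int.mod_nonneg _ hNpos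
  have hrN : r < (N:Int) := PySem.Int.mod_lt _ hNpos
  rw [PySem.List.pyRepeat_singleton, PySem.List.pyRepeat_singleton]
  set T := List.replicate ((N:Int) - r).toNat q ++ List.replicate r.toNat (q+1) with hT
  have hmapeq : (List.range N).map (solF s N) = T.reverse := by
    rw [hT, List.reverse_append, List.reverse_replicate, List.reverse_replicate]
    apply List.ext_getElem
    · simp; omega
    · intro i hi hi'
      simp only [List.length_map, List.length_range] at hi
      have hiN : (i:Int) < (N:Int) := by exact_mod_cast hi
      have hi0 : (0:Int) ≤ (i:Int) := Int.natCast_nonneg i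
      simp only [List.getElem_map, List.getElem_range]
      unfold solF
      rw [PySem.Int.floordiv_eq_ediv_of_pos hNpos,
          show s + (N:Int) - 1 - (i:Int) = (r + (N:Int) - 1 - (i:Int)) + q * (N:Int) by omega,
          Int.add_mul_ediv_right _ _ (by omega),
          ediv_small _ _ (by omega) (by omega) (by omega)]
      by_cases hcase : i < r.toNat
      · rw [List.getElem_append_left (by simpa using hcase), List.getElem_replicate]
        have : (i:Int) < r := by omega
        split_ifs <;> omega
      · rw [List.getElem_append_right (by simpa using hcase), List.getElem_replicate]
        have : r ≤ (i:Int) := by omega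
        split_ifs <;> omega
  have hperm : (PySem.List.sorted ((List.range N).map (solF s N)) (fun x => x) false).Perm T :=
    (PySem.List.sorted_perm _ _ _).trans (by rw [hmapeq]; exact T.reverse_perm)
  have hTpair : T.Pairwise (fun a b : Int => a ≤ b) := by
    rw [hT]
    refine List.pairwise_append.mpr ⟨?_, ?_, ?_⟩
    · exact List.pairwise_replicate.mpr (Or.inr le_rfl)
    · exact List.pairwise_replicate.mpr (Or.inr le_rfl)
    · intro x hx y hy
      rw [List.eq_of_mem_replicate hx, List.eq_of_mem_replicate hy]
      omega
  exact List.Perm.eq_of_pairwise (fun a b _ _ h1 h2 => le_antisymm h1 h2)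
    (PySem.List.sorted_pairwise _ _) hTpair hperm

-- ===== VERDICT (by name: the statement is the Claim_ definition above) =====
theorem solution_spec : Claim_equal_solution := by
  intro n s _
  unfold Spec_solution solution solution_alt
  by_cases hns : n > s
  · simp [hns]
  · simp only [if_neg hns]
    by_cases hn0 : n ≤ 0
    · -- n ≤ s and n ≤ 0: the loop is empty and both sides are []
      rw [if_pos hn0, PySem.List.pyRange_neg_one_eq_nil (by omega), List.foldl_nil]
      simp only [PySem.List.pyRepeat_singleton, PySem.List.slice_to_neg_one]
      rcases (show (n+1).toNat = 0 ∨ (n+1).toNat = 1 by omega) with h | h <;>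
        simp [h, PySem.List.sorted]
    · -- 1 ≤ n ≤ s: the main case
      rw [if_neg hn0]
      obtain ⟨N, hN⟩ : ∃ N : Nat, n = (N:Int) := ⟨n.toNat, by omega⟩
      have hN1 : 1 ≤ N := by omega
      subst hN
      rw [show ((N:Int)+1) = ((N+1:Nat):Int) by push_cast; ring]
      simp only [PySem.List.pyRepeat_singleton, Int.toNat_natCast]
      rw [loopA N s (List.replicate (N+1) 0) (List.replicate (N+1) s)
            (by simp) (by simp)
            (by simp [List.getD_eq_getElem?_getD])]
      rw [List.drop_replicate, show N + 1 - N = 1 by omega]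
      rw [PySem.List.slice_to_neg_one, List.replicate_one, List.dropLast_concat]
      rw [sorted_distrib N hN1 s, PySem.List.pyRepeat_singleton, PySem.List.pyRepeat_singleton]
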